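-- pv_equiv track=rewrite | github.com/koteitan/googolbook-lm | tools/tokens/tokens.py | filter_excluded_content
-- ===== SOURCE A (Python) =====
-- from typing import List
--
-- def filter_excluded_content(content: str, excluded_namespaces: List[str]) -> str:
--     """
--     Filter out content sections that match excluded namespaces.
--     This removes table rows and sections that reference excluded namespace pages.
--
--     Args:
--         content: HTML content to filter
--         excluded_namespaces: List of excluded namespace prefixes
--
--     Returns:
--         Filtered content with excluded sections removed
--     """
--     if not excluded_namespaces:
--         return content
--
--     lines = content.split('\n')
--     filtered_lines = []
--
--     for line in lines:
--         # Check if line contains references to excluded namespaces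
--         should_exclude = False
--         for namespace in excluded_namespaces:
--             # Look for namespace references in various formats
--             if f"{namespace}:" in line or f"{namespace} " in line:
--                 should_exclude = True
--                 break
--
--         if not should_exclude:
--             filtered_lines.append(line)
--
--     return '\n'.join(filtered_lines)
-- ===== SOURCE B (Python) =====
-- def filter_excluded_content(content, excluded_namespaces):
--     """Filter by needle, not by line: precompute the needle list (ns+':' and
--     ns+' '), then iteratively shrink the survivor list one needle at a time."""
--     if not excluded_namespaces:
--         return content
--
--     needles = [ns + suffix for ns in excluded_namespaces for suffix in (':', ' ')]
--
--     survivors = content.split('\n')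
--     for nd in needles:
--         survivors = [line for line in survivors if nd not in line]
--     return '\n'.join(survivors)
-- ===== Notes on version B (the rewrite author's own statement) =====
-- stated objective: alternative
-- what changed: A loops over lines and, per line, over namespaces with a break, testing two substrings each; B precomputes the flat needle list (ns+':' and ns+' ') and interchanges the loops, iteratively shrinking a survivor line list with one filter pass per needle before rejoining.
import Mathlib
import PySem

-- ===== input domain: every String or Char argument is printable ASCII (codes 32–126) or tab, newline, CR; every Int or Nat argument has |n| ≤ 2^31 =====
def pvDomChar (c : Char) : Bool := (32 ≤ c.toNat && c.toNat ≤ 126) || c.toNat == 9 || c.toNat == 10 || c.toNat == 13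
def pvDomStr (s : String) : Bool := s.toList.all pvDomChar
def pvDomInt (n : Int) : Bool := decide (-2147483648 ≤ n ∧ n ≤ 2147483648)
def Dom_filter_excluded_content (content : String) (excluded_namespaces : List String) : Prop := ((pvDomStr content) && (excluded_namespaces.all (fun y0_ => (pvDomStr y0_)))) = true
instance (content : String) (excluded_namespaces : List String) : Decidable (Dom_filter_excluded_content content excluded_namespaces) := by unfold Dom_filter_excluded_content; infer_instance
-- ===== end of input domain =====

-- B restructures A: instead of A's per-line loop over namespaces with a break, B precomputes
-- the flat needle list (ns+':' and ns+' ') and filters by needle, iteratively shrinking the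
-- survivor line list one needle at a time (alternative decomposition, same exact result).


-- ===== PORT A =====
-- inner 'for namespace in excluded_namespaces: … break' loop (first match stops the loop)
def pvShouldExclude (line : List Char) : List String → Bool
  | [] => false
  | ns :: rest =>
    if PySem.Chars.isIn (ns.toList ++ [':']) line || PySem.Chars.isIn (ns.toList ++ [' ']) line then
      true
    else pvShouldExclude line rest

def filter_excluded_content (content : String) (excluded_namespaces : List String) : String :=
  if excluded_namespaces = [] then content
  else
    -- content.split('\n'): sep "\n" ≠ "", so split? is always some
    let lines := (PySem.Str.split? content "\n").getD []
    let filtered_lines := lines.foldl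
      (fun acc line => if !(pvShouldExclude line.toList excluded_namespaces) then acc ++ [line] else acc) []
    PySem.Str.join "\n" filtered_lines

-- ===== PORT B =====
-- needles = [ns + suffix for ns in excluded_namespaces for suffix in (':', ' ')]
def pvNeedles (excluded_namespaces : List String) : List (List Char) :=
  excluded_namespaces.flatMap (fun ns => [ns.toList ++ [':'], ns.toList ++ [' ']])

def filter_excluded_content_alt (content : String) (excluded_namespaces : List String) : String :=
  if excluded_namespaces = [] then content
  else
    let needles := pvNeedles excluded_namespaces
    -- for nd in needles: survivors = [line for line in survivors if nd not in line]
    let survivors := needles.foldl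
      (fun survivors nd => survivors.filter (fun line => !(PySem.Chars.isIn nd line.toList)))
      ((PySem.Str.split? content "\n").getD [])
    PySem.Str.join "\n" survivors

-- ===== PRECONDITION & SPEC =====
def Spec_filter_excluded_content (content : String) (excluded_namespaces : List String) (out : String) : Prop := out = filter_excluded_content_alt content excluded_namespaces
instance (content : String) (excluded_namespaces : List String) (out : String) : Decidable (Spec_filter_excluded_content content excluded_namespaces out) := by unfold Spec_filter_excluded_content; infer_instance

-- ===== CLAIM (what is proved, stated in full; the proofs are below) =====
def Claim_equal_filter_excluded_content : Prop := ∀ (content : String) (excluded_namespaces : List String), Dom_filter_excluded_content content excluded_namespaces → Spec_filter_excluded_content content excluded_namespaces (filter_excluded_content content excluded_namespaces)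

-- ===== LEMMAS AND PROOFS =====

-- A's inner loop-with-break is an 'any' over the namespace list
theorem pvShouldExclude_eq_any (line : List Char) (nss : List String) :
    pvShouldExclude line nss
      = nss.any (fun ns => PySem.Chars.isIn (ns.toList ++ [':']) line || PySem.Chars.isIn (ns.toList ++ [' ']) line) := by
  induction nss with
  | nil => rfl
  | cons ns rest ih =>
    simp only [pvShouldExclude, List.any_cons, ih]
    split_ifs with hc <;> simp [hc]

-- B's iterated filtering is one filter by the conjunction of all needle tests
theorem pvFoldl_filter_eq_filter_all {α β : Type} (q : β → α → Bool) (nds : List β) (xs : List α) :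
    nds.foldl (fun s nd => s.filter (q nd)) xs = xs.filter (fun x => nds.all (fun nd => q nd x)) := by
  induction nds generalizing xs with
  | nil => simp
  | cons nd rest ih =>
    simp only [List.foldl_cons, ih, List.filter_filter, List.all_cons]
    apply List.filter_congr
    intro x _
    exact Bool.and_comm _ _

-- pointwise: surviving all needles = not excluded by any namespace
theorem pvAll_needles_eq_not_should (nss : List String) (line : List Char) :
    (pvNeedles nss).all (fun nd => !(PySem.Chars.isIn nd line)) = !(pvShouldExclude line nss) := by
  rw [pvShouldExclude_eq_any, pvNeedles, List.all_flatMap]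
  simp only [← List.not_any_eq_all_not, List.any_cons, List.any_nil, Bool.or_false]

-- ===== VERDICT (by name: the statement is the Claim_ definition above) =====
theorem filter_excluded_content_spec : Claim_equal_filter_excluded_content := by
  intro content nss _
  unfold Spec_filter_excluded_content filter_excluded_content filter_excluded_content_alt
  by_cases h : nss = []
  · simp [h]
  · simp only [h, if_false]
    rw [PySem.List.foldl_append_if (fun (line : String) => !(pvShouldExclude line.toList nss)) (fun x => x),
      pvFoldl_filter_eq_filter_all]
    simp only [List.nil_append, List.map_id_fun', id]
    congr 1
    apply List.filter_congr
    intro line _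
    rw [pvAll_needles_eq_not_should]
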